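-- pv_equiv track=rewrite | github.com/KristianFenn/AoC2020 | day9.py | part_1
-- ===== SOURCE A (Python) =====
-- from itertools import permutations
--
-- def part_1(input, preamble_len):
--     input = [int(x) for x in input]
--     idx = 0
--
--     while True:
--         preamble = input[idx:idx + preamble_len]
--         value = input[idx + preamble_len]
--
--         valid = False
--
--         for permutation in permutations(preamble, 2):
--             if sum(permutation) == value:
--                 valid = True
--                 break
--
--         if not valid:
--             return value
--
--         idx += 1
-- ===== SOURCE B (Python) =====
-- def part_1(input, preamble_len):
--     values = [int(x) for x in input]
--     p = preamble_len
--     if p < 0: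
--         raise ValueError("preamble_len must be non-negative")
--     for i in range(p, len(values)):
--         v = values[i]
--         window = values[i - p:i]
--         seen = set(window)
--         if not any(v - x in seen and (v - x != x or window.count(x) >= 2) for x in seen):
--             return v
--     raise ValueError("no invalid number found")
-- ===== Notes on version B (the rewrite author's own statement) =====
-- stated objective: faster
-- what changed: Replaces A's O(p^2) itertools.permutations scan of every window by an O(p) set-membership test (value - x in set(window), with a count check for the case value - x == x) inside an index-based for loop; negative preamble_len (where A's accidental negative-index slicing still returns a value) is rejected with ValueError and excluded by Pre_.
-- outside the precondition, e.g. on part_1([1, 2, 3], -1): A returns 1, B raises ValueError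
import Mathlib
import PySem

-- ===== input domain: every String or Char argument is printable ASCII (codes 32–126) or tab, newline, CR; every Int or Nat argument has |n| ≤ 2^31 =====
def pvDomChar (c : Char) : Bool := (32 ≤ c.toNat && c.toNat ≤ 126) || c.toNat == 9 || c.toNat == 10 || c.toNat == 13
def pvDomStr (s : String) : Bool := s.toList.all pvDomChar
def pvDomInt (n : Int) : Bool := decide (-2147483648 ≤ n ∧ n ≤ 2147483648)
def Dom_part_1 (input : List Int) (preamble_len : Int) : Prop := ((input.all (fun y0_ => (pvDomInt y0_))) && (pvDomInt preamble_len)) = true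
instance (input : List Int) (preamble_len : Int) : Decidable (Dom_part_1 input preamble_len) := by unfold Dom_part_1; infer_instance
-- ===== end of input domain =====

-- B replaces A's quadratic permutations scan of each window by a set-membership test
-- (value - x in set(window), with a count check for the doubled-element case); objective: faster.

-- ===== PORT A =====
-- termination helper for part1go (cited in decreasing_by)
theorem pv_pyGet?_some_lt {xs : List Int} {i : Int} {v : Int}
    (h : PySem.List.pyGet? xs i = some v) : i < (xs.length : Int) := by
  by_contra hge
  have hn : PySem.List.pyGet? xs i = none := by
    rw [PySem.List.pyGet?_eq_none_iff]
    simp only [PySem.Raise.InRange]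
    omega
  rw [hn] at h
  simp at h

-- A's 'while True' loop, one call per value of idx; the leading
-- 'input = [int(x) for x in input]' is the identity on a list of ints.
def part1go (input : List Int) (p : Int) (idx : Int) : Int :=
  match h : PySem.List.pyGet? input (idx + p) with
  | none => 0  -- Python raises IndexError here (excluded by Pre_part_1)
  | some value =>
    let preamble := PySem.List.slice input (some idx) (some (idx + p))
    -- 'for permutation in permutations(preamble, 2): if sum(permutation) == value: valid = True; break'
    if (PySem.List.permutations preamble 2).any (fun q => q.sum == value) then
      part1go input p (idx + 1)
    else value
termination_by ((input.length : Int) - (idx + p)).toNat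
decreasing_by
  have := pv_pyGet?_some_lt h
  omega

def part_1 (input : List Int) (preamble_len : Int) : Int :=
  part1go input preamble_len 0

-- ===== PORT B =====
-- B's 'for i in range(p, len(values))' loop, one call per value of i.
def altGo (values : List Int) (p : Int) (i : Int) : Int :=
  if h : i < (values.length : Int) then
    let v := PySem.List.pyGetD values i 0     -- values[i]; exact: under Pre_, 0 ≤ p ≤ i < len
    let window := PySem.List.slice values (some (i - p)) (some i)
    let seen := PySem.Set.ofList window
    if seen.any (fun x => PySem.Set.contains seen (v - x) &&
        (!(v - x == x) || decide (2 ≤ PySem.List.count window x))) then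
      altGo values p (i + 1)
    else v
  else 0  -- loop exhausted: Python raises ValueError (excluded by Pre_part_1)
termination_by ((values.length : Int) - i).toNat
decreasing_by omega

def part_1_alt (input : List Int) (preamble_len : Int) : Int :=
  if preamble_len < 0 then 0  -- Python raises ValueError (excluded by Pre_part_1)
  else altGo input preamble_len preamble_len

-- ===== PRECONDITION & SPEC =====
-- Pre_ excludes negative preamble_len (A then reads a window through negative-index
-- wraparound, an accident of its slicing, while B raises ValueError) and inputs where
-- every value is a valid sum, on which A runs off the end (IndexError) and B raises ValueError.
def Pre_part_1 (input : List Int) (preamble_len : Int) : Prop :=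
  0 ≤ preamble_len ∧
  ∃ i < input.length, preamble_len ≤ (i : Int) ∧
    ¬ ∃ a < i, ∃ b < i, (i : Int) ≤ (a : Int) + preamble_len ∧ (i : Int) ≤ (b : Int) + preamble_len ∧
      a ≠ b ∧ input.getD a 0 + input.getD b 0 = input.getD i 0
instance (input : List Int) (preamble_len : Int) : Decidable (Pre_part_1 input preamble_len) := by
  unfold Pre_part_1; infer_instance

def pvWitness_part_1 : List Int × Int := ([1, 2, 4], 2)

def Spec_part_1 (input : List Int) (preamble_len : Int) (out : Int) : Prop := out = part_1_alt input preamble_len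
instance (input : List Int) (preamble_len : Int) (out : Int) : Decidable (Spec_part_1 input preamble_len out) := by unfold Spec_part_1; infer_instance

-- ===== CLAIM (what is proved, stated in full; the proofs are below) =====
def Claim_equal_part_1 : Prop := ∀ (input : List Int) (preamble_len : Int), Dom_part_1 input preamble_len → Pre_part_1 input preamble_len → Spec_part_1 input preamble_len (part_1 input preamble_len)

-- ===== LEMMAS AND PROOFS =====

-- The condition both window checks decide: some element of w, together with an element
-- at a DIFFERENT position, sums to v.
def HasPair (w : List Int) (v : Int) : Prop :=
  ∃ i, ∃ _ : i < w.length, (v - w[i]) ∈ w.eraseIdx i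

-- two distinct positions holding x give count ≥ 2 …
theorem count_two_of_getElem (w : List Int) (x : Int) :
    ∀ i j, ∀ _hi : i < w.length, ∀ _hj : j < w.length, i ≠ j → w[i] = x → w[j] = x →
      2 ≤ w.count x := by
  induction w with
  | nil => intro i j hi; simp at hi
  | cons a t ih =>
    intro i j hi hj hij hxi hxj
    match i, j with
    | 0, 0 => exact absurd rfl hij
    | 0, j+1 =>
      simp only [List.getElem_cons_zero] at hxi
      simp only [List.getElem_cons_succ] at hxj
      have hmem : x ∈ t := hxj ▸ List.getElem_mem _
      have h1 : 1 ≤ t.count x := List.count_pos_iff.mpr hmem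
      subst hxi
      rw [List.count_cons_self]
      omega
    | i+1, 0 =>
      simp only [List.getElem_cons_zero] at hxj
      simp only [List.getElem_cons_succ] at hxi
      have hmem : x ∈ t := hxi ▸ List.getElem_mem _
      have h1 : 1 ≤ t.count x := List.count_pos_iff.mpr hmem
      subst hxj
      rw [List.count_cons_self]
      omega
    | i+1, j+1 =>
      simp only [List.getElem_cons_succ] at hxi hxj
      have := ih i j (by simpa using hi) (by simpa using hj) (by omega) hxi hxj
      calc 2 ≤ t.count x := this
        _ ≤ (a :: t).count x := by rw [List.count_cons]; omega

-- … and conversely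
theorem getElem_two_of_count (w : List Int) (x : Int) (h : 2 ≤ w.count x) :
    ∃ i, ∃ _ : i < w.length, ∃ j, ∃ _ : j < w.length, i ≠ j ∧ w[i] = x ∧ w[j] = x := by
  induction w with
  | nil => simp at h
  | cons a t ih =>
    by_cases hax : a = x
    · subst hax
      rw [List.count_cons_self] at h
      have hmem : a ∈ t := List.count_pos_iff.mp (by omega)
      obtain ⟨k, hk, hek⟩ := List.mem_iff_getElem.mp hmem
      exact ⟨0, by simp, k+1, by simpa using hk, by omega, by simp, by simpa using hek⟩
    · rw [List.count_cons_of_ne hax] at h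
      obtain ⟨i, hi, j, hj, hij, hxi, hxj⟩ := ih h
      exact ⟨i+1, by simpa using hi, j+1, by simpa using hj, by omega,
        by simpa using hxi, by simpa using hxj⟩

-- itertools.permutations(e, 1) lists the singletons of e
theorem mem_perm1 (e q : List Int) :
    q ∈ PySem.List.permutations e 1 ↔ ∃ y ∈ e, q = [y] := by
  rw [show (1:Nat) = 0+1 from rfl, PySem.List.permutations]
  simp only [List.mem_flatMap, List.mem_range]
  constructor
  · rintro ⟨i, hi, hq⟩
    cases hg : e[i]? with
    | none => rw [hg] at hq; simp at hq
    | some y =>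
      rw [hg] at hq
      simp only [PySem.List.permutations, List.mem_map] at hq
      obtain ⟨p, hp, rfl⟩ := hq
      have : p = [] := by simpa [PySem.List.permutations] using hp
      subst this
      exact ⟨y, List.mem_of_getElem? hg, rfl⟩
  · rintro ⟨y, hy, rfl⟩
    obtain ⟨i, hi, rfl⟩ := List.mem_iff_getElem.mp hy
    refine ⟨i, hi, ?_⟩
    rw [List.getElem?_eq_getElem hi]
    simp [PySem.List.permutations]

-- itertools.permutations(w, 2): an element of w followed by an element of the rest
theorem mem_perm2 (w q : List Int) :
    q ∈ PySem.List.permutations w 2 ↔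
      ∃ i, ∃ _h : i < w.length, ∃ y ∈ w.eraseIdx i, q = [w[i], y] := by
  rw [show (2:Nat) = 1+1 from rfl, PySem.List.permutations]
  simp only [List.mem_flatMap, List.mem_range]
  constructor
  · rintro ⟨i, hi, hq⟩
    rw [List.getElem?_eq_getElem hi] at hq
    simp only [List.mem_map] at hq
    obtain ⟨p, hp, rfl⟩ := hq
    obtain ⟨y, hy, rfl⟩ := (mem_perm1 _ _).mp hp
    exact ⟨i, hi, y, hy, rfl⟩
  · rintro ⟨i, hi, y, hy, rfl⟩
    refine ⟨i, hi, ?_⟩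
    rw [List.getElem?_eq_getElem hi]
    simp only [List.mem_map]
    exact ⟨[y], (mem_perm1 _ _).mpr ⟨y, hy, rfl⟩, rfl⟩

-- A's window check decides HasPair
theorem A_char (w : List Int) (v : Int) :
    ((PySem.List.permutations w 2).any (fun q => q.sum == v) = true) ↔ HasPair w v := by
  rw [List.any_eq_true]
  constructor
  · rintro ⟨q, hq, hs⟩
    obtain ⟨i, hi, y, hy, rfl⟩ := (mem_perm2 w q).mp hq
    simp only [List.sum_cons, List.sum_nil, add_zero, beq_iff_eq] at hs
    refine ⟨i, hi, ?_⟩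
    have : v - w[i] = y := by omega
    rwa [this]
  · rintro ⟨i, hi, hy⟩
    refine ⟨[w[i], v - w[i]], (mem_perm2 w _).mpr ⟨i, hi, _, hy, rfl⟩, ?_⟩
    simp

-- B's window check decides HasPair too
theorem B_char (w : List Int) (v : Int) :
    ((PySem.Set.ofList w).any (fun x => PySem.Set.contains (PySem.Set.ofList w) (v - x) &&
        (!(v - x == x) || decide (2 ≤ PySem.List.count w x))) = true) ↔ HasPair w v := by
  rw [List.any_eq_true]
  constructor
  · rintro ⟨x, hx, hb⟩
    rw [PySem.Set.mem_ofList] at hx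
    simp only [Bool.and_eq_true, Bool.or_eq_true, Bool.not_eq_true', beq_eq_false_iff_ne,
      decide_eq_true_eq, PySem.Set.contains_iff, PySem.Set.mem_ofList, PySem.List.count_eq] at hb
    obtain ⟨hvx, hcase⟩ := hb
    by_cases hvxx : v - x = x
    · have hcnt : 2 ≤ w.count x := by
        rcases hcase with hne | hcnt
        · exact absurd hvxx hne
        · exact hcnt
      obtain ⟨i, hi, j, hj, hij, hxi, hxj⟩ := getElem_two_of_count w x hcnt
      refine ⟨i, hi, List.mem_eraseIdx_iff_getElem.mpr ⟨j, hj, fun h => hij h.symm, ?_⟩⟩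
      rw [hxj, hxi, hvxx]
    · obtain ⟨i, hi, hxi⟩ := List.mem_iff_getElem.mp hx
      obtain ⟨j, hj, hyj⟩ := List.mem_iff_getElem.mp hvx
      refine ⟨i, hi, List.mem_eraseIdx_iff_getElem.mpr ⟨j, hj, ?_, by rw [hyj, hxi]⟩⟩
      intro hji; subst hji
      exact hvxx (by rw [hyj] at hxi; omega)
  · rintro ⟨i, hi, hy⟩
    obtain ⟨j, hj, hji, hyj⟩ := List.mem_eraseIdx_iff_getElem.mp hy
    refine ⟨w[i], (PySem.Set.mem_ofList w _).mpr (List.getElem_mem _), ?_⟩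
    simp only [Bool.and_eq_true, Bool.or_eq_true, Bool.not_eq_true', beq_eq_false_iff_ne,
      decide_eq_true_eq, PySem.Set.contains_iff, PySem.Set.mem_ofList, PySem.List.count_eq]
    refine ⟨hyj ▸ List.getElem_mem _, ?_⟩
    by_cases hne : v - w[i] = w[i]
    · right
      exact count_two_of_getElem w w[i] i j hi hj (fun h => hji h.symm) rfl (by omega)
    · left; exact hne

-- the two per-window checks agree as Booleans
theorem check_eq (w : List Int) (v : Int) :
    ((PySem.List.permutations w 2).any (fun q => q.sum == v)) =
    ((PySem.Set.ofList w).any (fun x => PySem.Set.contains (PySem.Set.ofList w) (v - x) &&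
        (!(v - x == x) || decide (2 ≤ PySem.List.count w x)))) := by
  rw [Bool.eq_iff_iff, A_char, B_char]

-- the two loops agree step for step: A at offset idx is B at index i = idx + p
theorem go_eq (input : List Int) (p : Int) :
    ∀ n idx, 0 ≤ p → 0 ≤ idx → ((input.length : Int) - (idx + p)).toNat = n →
      part1go input p idx = altGo input p (idx + p) := by
  intro n
  induction n with
  | zero =>
    intro idx hp hidx hm
    have hg : PySem.List.pyGet? input (idx + p) = none := by
      rw [PySem.List.pyGet?_eq_none_iff]; simp only [PySem.Raise.InRange]; omega
    rw [part1go.eq_def, hg, altGo.eq_def, dif_neg (by omega)]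
  | succ n ih =>
    intro idx hp hidx hm
    rw [part1go.eq_def, altGo.eq_def]
    cases hg : PySem.List.pyGet? input (idx + p) with
    | none =>
      have : ¬ PySem.Raise.InRange input.length (idx + p) := (PySem.List.pyGet?_eq_none_iff _ _).mp hg
      simp only [PySem.Raise.InRange] at this
      rw [dif_neg (by omega)]
    | some value =>
      have hlt := pv_pyGet?_some_lt hg
      rw [dif_pos hlt]
      have h2 := PySem.List.pyGet?_eq_some_getElem (xs := input) (i := idx + p) (by omega) hlt
      have hv : value = input[(idx + p).toNat]'(by omega) := by
        rw [hg] at h2; exact Option.some.inj h2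
      have hvD : PySem.List.pyGetD input (idx + p) 0 = value := by
        rw [PySem.List.pyGetD_eq_getElem input 0 (by omega) hlt, hv]
      have e : idx + p - p = idx := by ring
      rw [e, hvD]
      show (if (PySem.List.permutations (PySem.List.slice input (some idx) (some (idx + p))) 2).any
              (fun q => q.sum == value) then part1go input p (idx + 1) else value) =
           (if (PySem.Set.ofList (PySem.List.slice input (some idx) (some (idx + p)))).any
              (fun x => PySem.Set.contains (PySem.Set.ofList (PySem.List.slice input (some idx) (some (idx + p)))) (value - x) &&
                (!(value - x == x) || decide (2 ≤ PySem.List.count (PySem.List.slice input (some idx) (some (idx + p))) x))) then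
              altGo input p (idx + p + 1) else value)
      rw [check_eq]
      by_cases hc : (PySem.Set.ofList (PySem.List.slice input (some idx) (some (idx + p)))).any
              (fun x => PySem.Set.contains (PySem.Set.ofList (PySem.List.slice input (some idx) (some (idx + p)))) (value - x) &&
                (!(value - x == x) || decide (2 ≤ PySem.List.count (PySem.List.slice input (some idx) (some (idx + p))) x))) = true
      · rw [if_pos hc, if_pos hc]
        have := ih (idx + 1) hp (by omega) (by omega)
        rwa [show idx + 1 + p = idx + p + 1 by ring] at this
      · rw [if_neg hc, if_neg hc]

-- ===== VERDICT (by name: the statement is the Claim_ definition above) =====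
theorem part_1_spec : Claim_equal_part_1 := by
  intro input preamble_len _hdom hpre
  unfold Spec_part_1 part_1 part_1_alt
  obtain ⟨hp, -⟩ := hpre
  rw [if_neg (by omega)]
  have := go_eq input preamble_len (((input.length : Int) - (0 + preamble_len)).toNat) 0 hp le_rfl rfl
  rwa [zero_add] at this
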